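-- pv_equiv track=rewrite | github.com/smlmbrt/SimilarityRegression | Scripts/RunAPHID.py | ParseMatches
-- ===== SOURCE A (Python) =====
-- def ParseMatches(matchdict, maxP):
--     matchpos = {}
--     for seq in matchdict.keys():
--         s_pfam, s_seq, path = matchdict[seq]
--         path_pfam = [None]*len(path)
--         path_seq = [None]*len(path)
--
--         #Find the first non-deletion (0) position in the path for sequence
--         foundNonZero = False
--         i = 0
--         while foundNonZero == False:
--             if path[i] != 0:
--                 path_seq[i] = s_seq
--                 foundNonZero = True
--             i += 1
--         ##Fill in the rest of the path 2 sequence relationship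
--         lastP = s_seq
--         for i in range(path_seq.index(s_seq) + 1,len(path_seq)):
--             #Advance sequence position if it's not a deletion
--             if path[i] != 0:
--                 path_seq[i] = lastP + 1
--                 lastP += 1
--         #Find the first non-insert (2) position in the path for Pfam
--         foundNonInsert = False
--         i = 0
--         while foundNonInsert == False:
--             if path[i] != 2:
--                 path_pfam[i] = s_pfam
--                 foundNonInsert = True
--             i += 1
--         #Fill in rest of PFam relationships
--         lastP = s_pfam
--         for i in range(path_pfam.index(s_pfam) + 1,len(path_seq)):
--             #Advance Pfam position if it's not an insertion
--             if path[i] != 2: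
--                 path_pfam[i] = lastP + 1
--                 lastP += 1
--
--         #Get Matches
--         matches = ['-']*maxP
--         for p_pfam, p_seq in zip(path_pfam, path_seq):
--             #print p_pfam, p_seq
--             if p_pfam != None and p_seq != None:
--                 matches[p_pfam - 1] = seq[p_seq - 1]
--         matchpos[seq] = ''.join(matches)
--     return(matchpos)
-- ===== SOURCE B (Python) =====
-- def ParseMatches(matchdict, maxP):
--     # One pass per path with running seq/Pfam counters instead of A's two
--     # while-searches, two fill loops, intermediate arrays and final zip.
--     matchpos = {}
--     for seq in matchdict.keys():
--         s_pfam, s_seq, path = matchdict[seq]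
--         matches = ['-']*maxP
--         seq_pos = s_seq - 1
--         pfam_pos = s_pfam - 1
--         for step in path:
--             if step != 0:
--                 seq_pos += 1
--             if step != 2:
--                 pfam_pos += 1
--             if step != 0 and step != 2:
--                 matches[pfam_pos - 1] = seq[seq_pos - 1]
--         matchpos[seq] = ''.join(matches)
--     return matchpos
-- ===== Notes on version B (the rewrite author's own statement) =====
-- stated objective: simpler
-- what changed: For each sequence, one pass over path with two running position counters (seq_pos, pfam_pos) writes matches directly, replacing A's two while-searches, the list.index call, two range-fill loops over intermediate path_seq/path_pfam arrays and the final zip pass.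
import Mathlib
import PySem

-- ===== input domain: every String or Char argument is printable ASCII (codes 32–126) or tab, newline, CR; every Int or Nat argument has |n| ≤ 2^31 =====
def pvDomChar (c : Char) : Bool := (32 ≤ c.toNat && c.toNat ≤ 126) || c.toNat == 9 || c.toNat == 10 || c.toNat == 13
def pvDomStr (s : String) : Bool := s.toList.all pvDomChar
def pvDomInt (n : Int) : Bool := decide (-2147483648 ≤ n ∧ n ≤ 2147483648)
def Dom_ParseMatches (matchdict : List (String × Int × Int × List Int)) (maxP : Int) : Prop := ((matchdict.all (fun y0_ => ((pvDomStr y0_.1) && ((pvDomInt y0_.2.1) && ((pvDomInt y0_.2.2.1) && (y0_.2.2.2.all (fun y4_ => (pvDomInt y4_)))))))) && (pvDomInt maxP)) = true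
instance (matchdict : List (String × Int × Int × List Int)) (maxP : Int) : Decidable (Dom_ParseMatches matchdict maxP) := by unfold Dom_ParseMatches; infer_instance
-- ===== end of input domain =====

-- B replaces A's two while-searches, two pyRange fill loops over intermediate
-- path_seq/path_pfam arrays and the final zip pass by ONE pass over path that
-- maintains running seq/Pfam position counters and writes matches directly.

-- ===== PORT A =====
def pvScanA (bad : Int) : List Int → Nat → Option Nat
  | [], _ => none
  | x :: xs, i => if x ≠ bad then some i else pvScanA bad xs (i + 1)

def pvMarkA (bad : Int) (path : List Int) (n : Nat) (v : Int) : List (Option Int) :=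
  match pvScanA bad path 0 with
  | some i => (List.replicate n (none : Option Int)).set i (some v)
  | none => List.replicate n none

def pvFillA (bad : Int) (path : List Int) (start stop : Int)
    (st0 : List (Option Int) × Int) : List (Option Int) × Int :=
  (PySem.List.pyRange start stop 1).foldl
    (fun st i =>
      if PySem.List.pyGetD path i 0 ≠ bad
      then (PySem.List.pySetD st.1 i (some (st.2 + 1)), st.2 + 1)
      else st) st0

def pvEntryA (seq : String) (s_pfam s_seq : Int) (path : List Int) (maxP : Int) : String :=
  let n := path.length
  let path_seq1 := pvMarkA 0 path n s_seq
  let idx_s : Int := (((PySem.List.index? path_seq1 (some s_seq)).getD 0 : Nat) : Int)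
  let path_seq := (pvFillA 0 path (idx_s + 1) (n : Int) (path_seq1, s_seq)).1
  let path_pfam1 := pvMarkA 2 path n s_pfam
  let idx_p : Int := (((PySem.List.index? path_pfam1 (some s_pfam)).getD 0 : Nat) : Int)
  let path_pfam := (pvFillA 2 path (idx_p + 1) (n : Int) (path_pfam1, s_pfam)).1
  let mtchs0 := List.replicate maxP.toNat '-'
  let mtchs := (path_pfam.zip path_seq).foldl
    (fun m pq =>
      match pq with
      | (some p, some q) => PySem.List.pySetD m (p - 1) (PySem.List.pyGetD seq.toList (q - 1) '-')
      | _ => m) mtchs0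
  String.mk mtchs

def ParseMatches (matchdict : List (String × Int × Int × List Int)) (maxP : Int) : List (String × String) :=
  ((PySem.Dict.ofList matchdict).items.foldl
    (fun (d : PySem.Dict String String) e =>
      d.insert e.1 (pvEntryA e.1 e.2.1 e.2.2.1 e.2.2.2 maxP))
    PySem.Dict.empty).items

-- ===== PORT B =====
def pvEntryB (seq : String) (s_pfam s_seq : Int) (path : List Int) (maxP : Int) : String :=
  String.mk (path.foldl
    (fun (st : List Char × Int × Int) step =>
      let sp := if step ≠ 0 then st.2.1 + 1 else st.2.1
      let pp := if step ≠ 2 then st.2.2 + 1 else st.2.2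
      let m := if step ≠ 0 ∧ step ≠ 2
        then PySem.List.pySetD st.1 (pp - 1) (PySem.List.pyGetD seq.toList (sp - 1) '-')
        else st.1
      (m, sp, pp))
    (List.replicate maxP.toNat '-', s_seq - 1, s_pfam - 1)).1

def ParseMatches_alt (matchdict : List (String × Int × Int × List Int)) (maxP : Int) : List (String × String) :=
  ((PySem.Dict.ofList matchdict).items.foldl
    (fun (d : PySem.Dict String String) e =>
      d.insert e.1 (pvEntryB e.1 e.2.1 e.2.2.1 e.2.2.2 maxP))
    PySem.Dict.empty).items

-- ===== PRECONDITION & SPEC =====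
-- pvC bad path k = how many of the first k path steps are ≠ bad (as an Int)
def pvC (bad : Int) (path : List Int) (k : Nat) : Int :=
  (((path.take k).countP (fun x => x ≠ bad)) : Int)

-- Pre_ excludes exactly the inputs where the Python A raises IndexError: a path with
-- no non-0 step or no non-2 step (A's while-searches run off the end), or an aligned
-- match position outside matches / outside seq (A's final write or character lookup).
def PreEntry (seq : String) (s_pfam s_seq : Int) (path : List Int) (maxP : Int) : Prop :=
  (∃ x ∈ path, x ≠ 0) ∧ (∃ x ∈ path, x ≠ 2) ∧
  ∀ p ∈ path.zipIdx, p.1 ≠ 0 → p.1 ≠ 2 →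
    (-(maxP.toNat : Int) ≤ s_pfam + pvC 2 path (p.2 + 1) - 2 ∧ s_pfam + pvC 2 path (p.2 + 1) - 2 < (maxP.toNat : Int)) ∧
    (-(seq.toList.length : Int) ≤ s_seq + pvC 0 path (p.2 + 1) - 2 ∧ s_seq + pvC 0 path (p.2 + 1) - 2 < (seq.toList.length : Int))

def Pre_ParseMatches (matchdict : List (String × Int × Int × List Int)) (maxP : Int) : Prop :=
  ∀ e ∈ (PySem.Dict.ofList matchdict).items, PreEntry e.1 e.2.1 e.2.2.1 e.2.2.2 maxP

instance (matchdict : List (String × Int × Int × List Int)) (maxP : Int) : Decidable (Pre_ParseMatches matchdict maxP) := by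
  unfold Pre_ParseMatches PreEntry; infer_instance

def pvWitness_ParseMatches : (List (String × Int × Int × List Int)) × Int := ([("A", 1, 1, [1])], 1)

def Spec_ParseMatches (matchdict : List (String × Int × Int × List Int)) (maxP : Int) (out : List (String × String)) : Prop := out = ParseMatches_alt matchdict maxP
instance (matchdict : List (String × Int × Int × List Int)) (maxP : Int) (out : List (String × String)) : Decidable (Spec_ParseMatches matchdict maxP out) := by unfold Spec_ParseMatches; infer_instance

-- ===== CLAIM (what is proved, stated in full; the proofs are below) =====
def Claim_equal_ParseMatches : Prop := ∀ (matchdict : List (String × Int × Int × List Int)) (maxP : Int), Dom_ParseMatches matchdict maxP → Pre_ParseMatches matchdict maxP → Spec_ParseMatches matchdict maxP (ParseMatches matchdict maxP)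


-- ===== LEMMAS AND PROOFS =====

theorem pvC_concat_le (bad : Int) (ys : List Int) (x : Int) (k : Nat) (h : k ≤ ys.length) :
    pvC bad (ys ++ [x]) k = pvC bad ys k := by
  simp [pvC, List.take_append_of_le_length h]

theorem pvC_concat_full (bad : Int) (ys : List Int) (x : Int) :
    pvC bad (ys ++ [x]) (ys.length + 1) = pvC bad ys ys.length + (if x ≠ bad then 1 else 0) := by
  simp [pvC, List.take_add_one, List.countP_append]

theorem getD_concat_lt (ys : List Int) (x : Int) (i : Nat) (h : i < ys.length) :
    (ys ++ [x]).getD i 0 = ys.getD i 0 := by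
  simp [List.getD, List.getElem?_append_left h]

theorem getD_concat_self (ys : List Int) (x : Int) : (ys ++ [x]).getD ys.length 0 = x := by
  simp

-- the canonical single-pass description both entry computations reduce to
def pvCanon (seq : String) (s_pfam s_seq : Int) (path : List Int) (m0 : List Char) : List Char :=
  (List.range path.length).foldl
    (fun m i =>
      if path.getD i 0 ≠ 0 ∧ path.getD i 0 ≠ 2
      then PySem.List.pySetD m (s_pfam + pvC 2 path (i + 1) - 2)
             (PySem.List.pyGetD seq.toList (s_seq + pvC 0 path (i + 1) - 2) '-')
      else m) m0

theorem pvC_succ (bad : Int) (path : List Int) (k : Nat) (hk : k < path.length) :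
    pvC bad path (k + 1) = pvC bad path k + (if path.getD k 0 ≠ bad then 1 else 0) := by
  have h1 : path.take (k + 1) = path.take k ++ path[k]?.toList := List.take_add_one ..
  have h2 : path.getD k 0 = path[k] := by simp [List.getD, List.getElem?_eq_getElem hk]
  rw [pvC, pvC, h1, List.countP_append, List.getElem?_eq_getElem hk, h2]
  simp only [Option.toList_some, List.countP_cons, List.countP_nil]
  split <;> simp_all

theorem pvC_zeros (bad : Int) (path : List Int) (j : Nat)
    (hpre : ∀ k, k < j → path.getD k 0 = bad) (hj : j ≤ path.length) :
    pvC bad path j = 0 := by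
  induction j with
  | zero => simp [pvC]
  | succ m ih =>
    rw [pvC_succ bad path m (by omega), ih (fun k hk => hpre k (by omega)) (by omega),
      hpre m (by omega)]
    simp

theorem pvC_first (bad : Int) (path : List Int) (j : Nat) (hj : j < path.length)
    (hb : path.getD j 0 ≠ bad) (hpre : ∀ k, k < j → path.getD k 0 = bad) :
    pvC bad path (j + 1) = 1 := by
  rw [pvC_succ bad path j hj, pvC_zeros bad path j hpre (by omega)]
  simp only [if_pos hb]
  omega

theorem map_range_set {α : Type} (N : Nat) (f : Nat → α) (m : Nat) (w : α) (_hm : m < N) :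
    ((List.range N).map f).set m w = (List.range N).map (fun i => if i = m then w else f i) := by
  apply List.ext_getElem
  · simp
  · intro i hi _
    simp only [List.getElem_set, List.getElem_map, List.getElem_range]
    simp at hi
    split <;> simp_all
    omega

theorem repl_set_eq_map {α : Type} (n j : Nat) (v : α) (_hj : j < n) :
    (List.replicate n (none : Option α)).set j (some v)
      = (List.range n).map (fun i => if i = j then some v else none) := by
  apply List.ext_getElem
  · simp
  · intro i hi _
    simp only [List.getElem_set, List.getElem_map, List.getElem_range]
    simp at hi
    split <;> simp_all
    omega

theorem repl_set_eq_app {α : Type} (n j : Nat) (v : α) (hj : j < n) :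
    (List.replicate n (none : Option α)).set j (some v)
      = List.replicate j none ++ some v :: List.replicate (n - j - 1) none := by
  apply List.ext_getElem
  · simp; omega
  · intro i hi1 hi2
    rw [List.getElem_set]
    by_cases h : i = j
    · subst h
      rw [if_pos rfl, List.getElem_append_right (by simp)]
      simp
    · rw [if_neg (fun hh => h hh.symm)]
      simp only [List.getElem_replicate]
      rcases Nat.lt_or_ge i j with hlt | hge
      · rw [List.getElem_append_left (by simpa using hlt)]
        simp
      · rw [List.getElem_append_right (by simp; omega)]
        simp only [List.length_replicate]
        rw [List.getElem_cons, dif_neg (by omega)]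
        simp

theorem index?_repl_set {α : Type} [BEq α] [LawfulBEq α] (n j : Nat) (v : α) (hj : j < n) :
    PySem.List.index? ((List.replicate n (none : Option α)).set j (some v)) (some v) = some j := by
  rw [repl_set_eq_app n j v hj]
  rw [PySem.List.index?_eq_some_iff]
  exact ⟨List.replicate j none, List.replicate (n - j - 1) none, rfl, by simp, by simp⟩


theorem pvScanA_spec (bad : Int) :
    ∀ (l : List Int) (i : Nat), (∃ x ∈ l, x ≠ bad) →
      ∃ j, j < l.length ∧ pvScanA bad l i = some (i + j) ∧ l.getD j 0 ≠ bad ∧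
        ∀ k, k < j → l.getD k 0 = bad := by
  intro l
  induction l with
  | nil => simp
  | cons y ys ih =>
    intro i hex
    by_cases hy : y = bad
    · obtain ⟨x, hx, hxb⟩ := hex
      have hex' : ∃ x ∈ ys, x ≠ bad := by
        rcases List.mem_cons.mp hx with h | h
        · exact absurd (h.trans hy) hxb
        · exact ⟨x, h, hxb⟩
      obtain ⟨j', hj', heq, hb, hpre⟩ := ih (i + 1) hex'
      refine ⟨j' + 1, by simp; omega, ?_, ?_, ?_⟩
      · simp [pvScanA, hy, heq]; omega
      · simpa using hb
      · intro k hk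
        cases k with
        | zero => simp [hy]
        | succ k' => simpa using hpre k' (by omega)
    · refine ⟨0, by simp, ?_, by simpa using hy, fun k hk => absurd hk (by omega)⟩
      simp [pvScanA, hy]

-- the filled array, described pointwise
def pvG (bad v : Int) (path : List Int) (j m i : Nat) : Option Int :=
  if i = j then some v
  else if j < i ∧ i < m ∧ path.getD i 0 ≠ bad then some (v + pvC bad path (i + 1) - 1)
  else none

theorem fill_spec (bad v : Int) (path : List Int) (j : Nat) (hj : j < path.length)
    (hbj : path.getD j 0 ≠ bad) (hpre : ∀ k, k < j → path.getD k 0 = bad) :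
    ∀ m : Nat, j + 1 ≤ m → m ≤ path.length →
      pvFillA bad path ((j : Int) + 1) (m : Int)
        ((List.range path.length).map (pvG bad v path j (j + 1)), v)
      = ((List.range path.length).map (pvG bad v path j m), v + pvC bad path m - 1) := by
  intro m hm
  induction m, hm using Nat.le_induction with
  | base =>
    intro _
    unfold pvFillA
    rw [show ((j : Int) + 1) = ((j + 1 : Nat) : Int) by push_cast; ring]
    rw [PySem.List.pyRange_one]
    simp only [sub_self, Int.toNat_zero, List.range_zero, List.map_nil, List.foldl_nil]
    rw [pvC_first bad path j hj hbj hpre]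
    simp
  | succ m hm ih =>
    intro hm2
    have hmlt : m < path.length := by omega
    unfold pvFillA at ih ⊢
    rw [show ((m + 1 : Nat) : Int) = ((m : Nat) : Int) + 1 by push_cast; ring,
      PySem.List.pyRange_one_succ_right (by omega), List.foldl_append, ih (by omega)]
    simp only [List.foldl_cons, List.foldl_nil]
    rw [PySem.List.pyGetD_natCast]
    by_cases hb : path.getD m 0 ≠ bad
    · rw [if_pos hb]
      simp only [PySem.List.pySetD_natCast]
      rw [map_range_set _ _ _ _ hmlt]
      refine Prod.ext ?_ ?_
      · apply List.map_congr_left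
        intro i hi
        have hi' : i < path.length := List.mem_range.mp hi
        by_cases him : i = m
        · subst him
          rw [if_pos rfl]
          unfold pvG
          rw [if_neg (by omega), if_pos ⟨by omega, by omega, hb⟩,
            pvC_succ bad path i hi', if_pos hb]
          ring_nf
        · rw [if_neg him]
          unfold pvG
          by_cases hij : i = j
          · simp [hij]
          · rw [if_neg hij, if_neg hij]
            by_cases hcond : j < i ∧ i < m ∧ path.getD i 0 ≠ bad
            · rw [if_pos hcond, if_pos ⟨hcond.1, by omega, hcond.2.2⟩]
            · rw [if_neg hcond, if_neg (by omega)]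
      · rw [pvC_succ bad path m hmlt, if_pos hb]
        ring
    · rw [if_neg hb]
      rw [pvC_succ bad path m hmlt, if_neg hb]
      refine Prod.ext ?_ ?_
      · apply List.map_congr_left
        intro i hi
        unfold pvG
        by_cases hij : i = j
        · simp [hij]
        · rw [if_neg hij, if_neg hij]
          by_cases hcond : j < i ∧ i < m ∧ path.getD i 0 ≠ bad
          · rw [if_pos hcond, if_pos ⟨hcond.1, by omega, hcond.2.2⟩]
          · rw [if_neg hcond]
            have hb' : path.getD m 0 = bad := by
              by_contra hbb
              exact hb hbb
            rw [if_neg ?_]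
            rintro ⟨h1, h2, h3⟩
            by_cases hx : i = m
            · exact h3 (hx ▸ hb')
            · exact hcond ⟨h1, by omega, h3⟩
      · ring

theorem canon_nil (seq : String) (sp ss : Int) (m0 : List Char) :
    pvCanon seq sp ss [] m0 = m0 := rfl

theorem canon_concat (seq : String) (sp ss : Int) (ys : List Int) (x : Int) (m0 : List Char) :
    pvCanon seq sp ss (ys ++ [x]) m0 =
      (if x ≠ 0 ∧ x ≠ 2
       then PySem.List.pySetD (pvCanon seq sp ss ys m0) (sp + pvC 2 ys ys.length - 1)
              (PySem.List.pyGetD seq.toList (ss + pvC 0 ys ys.length - 1) '-')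
       else pvCanon seq sp ss ys m0) := by
  unfold pvCanon
  have hlen : (ys ++ [x]).length = ys.length + 1 := by simp
  rw [hlen, List.range_succ, List.foldl_append]
  have hpref : ∀ m0 : List Char,
      (List.range ys.length).foldl
        (fun m i =>
          if (ys ++ [x]).getD i 0 ≠ 0 ∧ (ys ++ [x]).getD i 0 ≠ 2
          then PySem.List.pySetD m (sp + pvC 2 (ys ++ [x]) (i + 1) - 2)
                 (PySem.List.pyGetD seq.toList (ss + pvC 0 (ys ++ [x]) (i + 1) - 2) '-')
          else m) m0
      = (List.range ys.length).foldl
        (fun m i =>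
          if ys.getD i 0 ≠ 0 ∧ ys.getD i 0 ≠ 2
          then PySem.List.pySetD m (sp + pvC 2 ys (i + 1) - 2)
                 (PySem.List.pyGetD seq.toList (ss + pvC 0 ys (i + 1) - 2) '-')
          else m) m0 := by
    intro m0
    apply PySem.List.foldl_congr_mem
    intro m i hi
    have hi' : i < ys.length := List.mem_range.mp hi
    rw [getD_concat_lt _ _ _ hi', pvC_concat_le _ _ _ _ (by omega), pvC_concat_le _ _ _ _ (by omega)]
  rw [hpref]
  simp only [List.foldl_cons, List.foldl_nil, getD_concat_self,
    pvC_concat_full]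
  split
  · rename_i h
    simp [h.1, h.2]
    ring_nf
  · rfl

theorem bInv (seq : String) (sp ss : Int) (m0 : List Char) (path : List Int) :
    path.foldl
      (fun (st : List Char × Int × Int) step =>
        let sp' := if step ≠ 0 then st.2.1 + 1 else st.2.1
        let pp' := if step ≠ 2 then st.2.2 + 1 else st.2.2
        let m := if step ≠ 0 ∧ step ≠ 2
          then PySem.List.pySetD st.1 (pp' - 1) (PySem.List.pyGetD seq.toList (sp' - 1) '-')
          else st.1
        (m, sp', pp'))
      (m0, ss - 1, sp - 1)
    = (pvCanon seq sp ss path m0, ss - 1 + pvC 0 path path.length, sp - 1 + pvC 2 path path.length) := by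
  induction path using List.reverseRecOn with
  | nil => simp [canon_nil, pvC]
  | append_singleton ys x ih =>
    rw [List.foldl_append, ih]
    simp only [List.foldl_cons, List.foldl_nil]
    rw [canon_concat]
    have h0 := pvC_concat_full 0 ys x
    have h2 := pvC_concat_full 2 ys x
    have hlen : (ys ++ [x]).length = ys.length + 1 := by simp
    rw [hlen, h0, h2]
    by_cases hx0 : x = 0 <;> by_cases hx2 : x = 2 <;>
      simp [hx0, hx2] <;> ring_nf <;> simp


theorem zip_canon (seq : String) (sp ss : Int) (path : List Int) (m0 : List Char)
    (j0 k0 : Nat)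
    (hj0 : j0 < path.length) (hbj0 : path.getD j0 0 ≠ 0) (hprej : ∀ k, k < j0 → path.getD k 0 = 0)
    (hk0 : k0 < path.length) (hbk0 : path.getD k0 0 ≠ 2) (hprek : ∀ k, k < k0 → path.getD k 0 = 2) :
    (((List.range path.length).map (pvG 2 sp path k0 path.length)).zip
      ((List.range path.length).map (pvG 0 ss path j0 path.length))).foldl
      (fun m pq =>
        match pq with
        | (some p, some q) => PySem.List.pySetD m (p - 1) (PySem.List.pyGetD seq.toList (q - 1) '-')
        | _ => m) m0 = pvCanon seq sp ss path m0 := by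
  rw [List.zip_map', List.foldl_map]
  unfold pvCanon
  apply PySem.List.foldl_congr_mem
  intro m i hi
  have hiN : i < path.length := List.mem_range.mp hi
  by_cases h02 : path.getD i 0 ≠ 0 ∧ path.getD i 0 ≠ 2
  · have hij : j0 ≤ i := by
      by_contra h
      exact h02.1 (hprej i (by omega))
    have hik : k0 ≤ i := by
      by_contra h
      exact h02.2 (hprek i (by omega))
    have hgs : pvG 0 ss path j0 path.length i = some (ss + pvC 0 path (i + 1) - 1) := by
      unfold pvG
      by_cases hij' : i = j0
      · subst hij'
        rw [if_pos rfl, pvC_first 0 path i hiN h02.1 hprej]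
        norm_num
      · rw [if_neg hij', if_pos ⟨by omega, by omega, h02.1⟩]
    have hgp : pvG 2 sp path k0 path.length i = some (sp + pvC 2 path (i + 1) - 1) := by
      unfold pvG
      by_cases hik' : i = k0
      · subst hik'
        rw [if_pos rfl, pvC_first 2 path i hiN h02.2 hprek]
        norm_num
      · rw [if_neg hik', if_pos ⟨by omega, by omega, h02.2⟩]
    rw [hgp, hgs, if_pos h02]
    show PySem.List.pySetD m (sp + pvC 2 path (i + 1) - 1 - 1) _ = _
    congr 1
    · ring
    · congr 1
      ring
  · rw [if_neg h02]
    by_cases h0 : path.getD i 0 = 0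
    · have hgs : pvG 0 ss path j0 path.length i = none := by
        unfold pvG
        rw [if_neg (by rintro rfl; exact hbj0 h0), if_neg (by rintro ⟨_, _, h⟩; exact h h0)]
      rw [hgs]
      cases pvG 2 sp path k0 path.length i <;> rfl
    · have h2 : path.getD i 0 = 2 := by
        by_contra h2
        exact h02 ⟨h0, h2⟩
      have hgp : pvG 2 sp path k0 path.length i = none := by
        unfold pvG
        rw [if_neg (by rintro rfl; exact hbk0 h2), if_neg (by rintro ⟨_, _, h⟩; exact h h2)]
      rw [hgp]

theorem entryB_eq_canon (seq : String) (s_pfam s_seq : Int) (path : List Int) (maxP : Int) :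
    pvEntryB seq s_pfam s_seq path maxP
      = String.mk (pvCanon seq s_pfam s_seq path (List.replicate maxP.toNat '-')) := by
  unfold pvEntryB
  rw [bInv]

theorem pvG_init (bad v : Int) (path : List Int) (j i : Nat) :
    pvG bad v path j (j + 1) i = if i = j then some v else none := by
  unfold pvG
  by_cases h : i = j
  · rw [if_pos h, if_pos h]
  · rw [if_neg h, if_neg h, if_neg (by omega)]


theorem entryA_eq_canon (seq : String) (s_pfam s_seq : Int) (path : List Int) (maxP : Int)
    (h0 : ∃ x ∈ path, x ≠ 0) (h2 : ∃ x ∈ path, x ≠ 2) :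
    pvEntryA seq s_pfam s_seq path maxP
      = String.mk (pvCanon seq s_pfam s_seq path (List.replicate maxP.toNat '-')) := by
  obtain ⟨j0, hj0, hscanj, hbj, hprej⟩ := pvScanA_spec 0 path 0 h0
  obtain ⟨k0, hk0, hscank, hbk, hprek⟩ := pvScanA_spec 2 path 0 h2
  rw [Nat.zero_add] at hscanj hscank
  unfold pvEntryA pvMarkA
  rw [hscanj, hscank]
  simp only [index?_repl_set _ _ _ hj0, index?_repl_set _ _ _ hk0, Option.getD_some]
  have hmapj : (List.replicate path.length (none : Option Int)).set j0 (some s_seq)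
      = (List.range path.length).map (pvG 0 s_seq path j0 (j0 + 1)) := by
    rw [repl_set_eq_map _ _ _ hj0]
    exact List.map_congr_left (fun i _ => (pvG_init 0 s_seq path j0 i).symm)
  have hmapk : (List.replicate path.length (none : Option Int)).set k0 (some s_pfam)
      = (List.range path.length).map (pvG 2 s_pfam path k0 (k0 + 1)) := by
    rw [repl_set_eq_map _ _ _ hk0]
    exact List.map_congr_left (fun i _ => (pvG_init 2 s_pfam path k0 i).symm)
  rw [hmapj, hmapk]
  rw [fill_spec 0 s_seq path j0 hj0 hbj hprej path.length (by omega) (by omega),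
    fill_spec 2 s_pfam path k0 hk0 hbk hprek path.length (by omega) (by omega)]
  rw [zip_canon seq s_pfam s_seq path _ j0 k0 hj0 hbj hprej hk0 hbk hprek]


-- ===== VERDICT (by name: the statement is the Claim_ definition above) =====
theorem ParseMatches_spec : Claim_equal_ParseMatches := by
  intro matchdict maxP _ hpre
  unfold Spec_ParseMatches ParseMatches ParseMatches_alt
  congr 1
  apply PySem.List.foldl_congr_mem
  intro d e he
  obtain ⟨hx0, hx2, _⟩ := hpre e he
  rw [entryA_eq_canon _ _ _ _ _ hx0 hx2, entryB_eq_canon]
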